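-- pv_equiv track=rewrite | github.com/FernandoZap/testecvs | app01/importacao_excel_folha_bak20230404.py | fun_salario100h
-- ===== SOURCE A (Python) =====
-- def fun_salario100h(psalario_100h,plista_sal100,plista_sal200):
--     sal100_0 = int(psalario_100h)-1
--     sal100_1 = int(psalario_100h)
--     sal100_2 = int(psalario_100h)+1
--
--     for k in range(len(plista_sal100)):
--         if plista_sal100[k]==sal100_0:
--             return plista_sal200[k]
--     for k in range(len(plista_sal100)):
--         if plista_sal100[k] == sal100_1:
--             return plista_sal200[k]
--     for k in range(len(plista_sal100)):
--         if plista_sal100[k] == sal100_2: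
--             return plista_sal200[k]
--
--     return psalario_100h
-- ===== SOURCE B (Python) =====
-- def fun_salario100h(psalario_100h, plista_sal100, plista_sal200):
--     p = int(psalario_100h)
--     r0 = r1 = r2 = None
--     for v, w in zip(plista_sal100, plista_sal200):
--         if r0 is None and v == p - 1:
--             r0 = w
--         if r1 is None and v == p:
--             r1 = w
--         if r2 is None and v == p + 1:
--             r2 = w
--     if r0 is not None:
--         return r0
--     if r1 is not None:
--         return r1
--     if r2 is not None:
--         return r2
--     return psalario_100h
-- ===== Notes on version B (the rewrite author's own statement) =====
-- stated objective: alternative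
-- what changed: Replaces A's three staged scans with early return by a single fused pass over the zipped value/salary pairs that accumulates the first matching salary for each of the three targets simultaneously, selecting among the accumulators only after the loop.
import Mathlib
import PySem

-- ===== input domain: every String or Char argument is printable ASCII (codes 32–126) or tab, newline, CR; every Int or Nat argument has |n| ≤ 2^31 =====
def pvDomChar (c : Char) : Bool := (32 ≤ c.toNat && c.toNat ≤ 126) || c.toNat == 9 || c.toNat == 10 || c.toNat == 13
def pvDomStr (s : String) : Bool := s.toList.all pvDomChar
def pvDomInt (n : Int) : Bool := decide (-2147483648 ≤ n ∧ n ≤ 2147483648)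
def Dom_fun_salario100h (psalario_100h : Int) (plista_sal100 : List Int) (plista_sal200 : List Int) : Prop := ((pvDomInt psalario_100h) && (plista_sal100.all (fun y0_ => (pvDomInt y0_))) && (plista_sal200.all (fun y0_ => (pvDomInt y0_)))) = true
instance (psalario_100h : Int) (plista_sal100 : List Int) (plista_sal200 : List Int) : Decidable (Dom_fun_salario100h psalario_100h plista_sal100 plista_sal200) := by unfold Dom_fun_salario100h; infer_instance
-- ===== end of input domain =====

-- B replaces A's three staged scans with early return by one fused pass over the zipped
-- pairs that accumulates the first matching salary per target, choosing after the loop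
-- (objective: alternative structure, same result).

-- ===== PORT A =====
-- one 'for k in range(len(plista_sal100)): if plista_sal100[k]==target: return plista_sal200[k]'
-- loop; plista_sal100[k] is in range by the guard, plista_sal200[k] is read with pyGetD
-- (in range under Pre_, outside which the Python raises IndexError)
def fun_scanA (target : Int) (l100 l200 : List Int) (k : Nat) : Option Int :=
  if h : k < l100.length then
    if l100[k] = target then some (PySem.List.pyGetD l200 (k : Int) 0)
    else fun_scanA target l100 l200 (k + 1)
  else none
termination_by l100.length - k

def fun_salario100h (psalario_100h : Int) (plista_sal100 : List Int) (plista_sal200 : List Int) : Int :=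
  let sal100_0 := psalario_100h - 1
  let sal100_1 := psalario_100h
  let sal100_2 := psalario_100h + 1
  match fun_scanA sal100_0 plista_sal100 plista_sal200 0 with
  | some r => r
  | none =>
    match fun_scanA sal100_1 plista_sal100 plista_sal200 0 with
    | some r => r
    | none =>
      match fun_scanA sal100_2 plista_sal100 plista_sal200 0 with
      | some r => r
      | none => psalario_100h

-- ===== PORT B =====
-- 'for v, w in zip(...): if r0 is None and v == p-1: r0 = w; …' — one loop body updating
-- the three accumulators; then the post-loop 'if r0 is not None: …' chain
def fun_stepB (p : Int) (st : Option Int × Option Int × Option Int) (vw : Int × Int) :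
    Option Int × Option Int × Option Int :=
  ((if st.1.isNone && vw.1 == p - 1 then some vw.2 else st.1),
   (if st.2.1.isNone && vw.1 == p then some vw.2 else st.2.1),
   (if st.2.2.isNone && vw.1 == p + 1 then some vw.2 else st.2.2))

def fun_salario100h_alt (psalario_100h : Int) (plista_sal100 : List Int) (plista_sal200 : List Int) : Int :=
  let p := psalario_100h
  let r := (plista_sal100.zip plista_sal200).foldl (fun_stepB p) (none, none, none)
  match r.1 with
  | some x => x
  | none =>
    match r.2.1 with
    | some x => x
    | none =>
      match r.2.2 with
      | some x => x
      | none => psalario_100h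

-- ===== PRECONDITION & SPEC =====
-- Pre_ excludes exactly the inputs where the Python A raises IndexError reading
-- plista_sal200[k]: the first index in plista_sal100 of the highest-priority matching
-- target (p-1, then p, then p+1) must be inside plista_sal200.
def Pre_fun_salario100h (psalario_100h : Int) (plista_sal100 : List Int) (plista_sal200 : List Int) : Prop :=
  (((PySem.List.index? plista_sal100 (psalario_100h - 1)).or
    ((PySem.List.index? plista_sal100 psalario_100h).or
     (PySem.List.index? plista_sal100 (psalario_100h + 1)))).all
      (fun k => decide (k < plista_sal200.length))) = true
instance (psalario_100h : Int) (plista_sal100 : List Int) (plista_sal200 : List Int) : Decidable (Pre_fun_salario100h psalario_100h plista_sal100 plista_sal200) := by unfold Pre_fun_salario100h; infer_instance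

def pvWitness_fun_salario100h : Int × List Int × List Int := (5, [5, 6], [10, 20])

def Spec_fun_salario100h (psalario_100h : Int) (plista_sal100 : List Int) (plista_sal200 : List Int) (out : Int) : Prop := out = fun_salario100h_alt psalario_100h plista_sal100 plista_sal200
instance (psalario_100h : Int) (plista_sal100 : List Int) (plista_sal200 : List Int) (out : Int) : Decidable (Spec_fun_salario100h psalario_100h plista_sal100 plista_sal200 out) := by unfold Spec_fun_salario100h; infer_instance

-- ===== CLAIM (what is proved, stated in full; the proofs are below) =====
def Claim_equal_fun_salario100h : Prop := ∀ (psalario_100h : Int) (plista_sal100 : List Int) (plista_sal200 : List Int), Dom_fun_salario100h psalario_100h plista_sal100 plista_sal200 → Pre_fun_salario100h psalario_100h plista_sal100 plista_sal200 → Spec_fun_salario100h psalario_100h plista_sal100 plista_sal200 (fun_salario100h psalario_100h plista_sal100 plista_sal200)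

-- ===== LEMMAS AND PROOFS =====

-- A's scan from index k returns plista_sal200 at the first index ≥ k where l100 holds target
theorem fun_scanA_eq (n : Nat) : ∀ (t : Int) (l100 l200 : List Int) (k : Nat), l100.length - k = n →
    fun_scanA t l100 l200 k =
      (PySem.List.index? (l100.drop k) t).map (fun j => PySem.List.pyGetD l200 ((k + j : Nat) : Int) 0) := by
  induction n with
  | zero =>
    intro t l100 l200 k hk
    rw [fun_scanA]
    have h : ¬ k < l100.length := by omega
    rw [List.drop_eq_nil_of_le (by omega : l100.length ≤ k)]
    simp [h]
  | succ m ih =>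
    intro t l100 l200 k hk
    rw [fun_scanA]
    have h : k < l100.length := by omega
    rw [List.drop_eq_getElem_cons h]
    by_cases he : l100[k] = t
    · rw [dif_pos h, if_pos he, he, PySem.List.index?_cons_self]
      simp
    · rw [dif_pos h, if_neg he, PySem.List.index?_cons_of_ne _ he,
        ih t l100 l200 (k + 1) (by omega)]
      cases PySem.List.index? (l100.drop (k + 1)) t with
      | none => simp
      | some j =>
        simp only [Option.map_some]
        congr 2
        omega

-- first matching snd in a list of pairs
def fun_firstSnd (t : Int) (zs : List (Int × Int)) : Option Int :=
  (zs.find? (fun vw => vw.1 == t)).map Prod.snd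

-- B's fold computes, per component, 'accumulator or else first match in the rest'
theorem fun_foldB_eq (p : Int) (zs : List (Int × Int)) :
    ∀ (a0 a1 a2 : Option Int),
      zs.foldl (fun_stepB p) (a0, a1, a2) =
        (a0.or (fun_firstSnd (p - 1) zs), a1.or (fun_firstSnd p zs), a2.or (fun_firstSnd (p + 1) zs)) := by
  induction zs with
  | nil => intro a0 a1 a2; simp [fun_firstSnd]
  | cons vw rest ih =>
    intro a0 a1 a2
    obtain ⟨v, w⟩ := vw
    simp only [List.foldl_cons, fun_stepB, ih]
    have comp : ∀ (a : Option Int) (t : Int),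
        (if a.isNone && v == t then some w else a).or (fun_firstSnd t rest) =
          a.or (fun_firstSnd t ((v, w) :: rest)) := by
      intro a t
      by_cases hv : v = t
      · have : fun_firstSnd t ((v, w) :: rest) = some w := by
          simp [fun_firstSnd, hv]
        rw [this]
        cases a with
        | none => simp [hv]
        | some x => simp
      · have : fun_firstSnd t ((v, w) :: rest) = fun_firstSnd t rest := by
          simp [fun_firstSnd, hv]
        rw [this]
        cases a with
        | none => simp [hv]
        | some x => simp
    rw [comp a0 (p - 1), comp a1 p, comp a2 (p + 1)]

-- first matching snd over a zip = first index in the fst list, read in the snd list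
theorem fun_firstSnd_zip (t : Int) : ∀ (l100 l200 : List Int),
    fun_firstSnd t (l100.zip l200) = (PySem.List.index? l100 t).bind (fun k => l200[k]?) := by
  intro l100
  induction l100 with
  | nil => intro l200; simp [fun_firstSnd]
  | cons x xs ih =>
    intro l200
    cases l200 with
    | nil =>
      simp only [List.zip_nil_right]
      rw [show fun_firstSnd t [] = none from rfl]
      cases h : PySem.List.index? (x :: xs) t with
      | none => simp
      | some k => simp
    | cons y ys =>
      by_cases hv : x = t
      · rw [hv, PySem.List.index?_cons_self]
        simp [fun_firstSnd]
      · rw [PySem.List.index?_cons_of_ne _ hv]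
        have : fun_firstSnd t ((x :: xs).zip (y :: ys)) = fun_firstSnd t (xs.zip ys) := by
          simp [fun_firstSnd, hv]
        rw [this, ih ys]
        cases PySem.List.index? xs t with
        | none => simp
        | some k => simp

-- ===== VERDICT (by name: the statement is the Claim_ definition above) =====
theorem fun_salario100h_spec : Claim_equal_fun_salario100h := by
  intro p l100 l200 _ hpre
  unfold Pre_fun_salario100h at hpre
  unfold Spec_fun_salario100h fun_salario100h fun_salario100h_alt
  simp only [fun_scanA_eq l100.length _ l100 l200 0 (by omega), List.drop_zero,
    fun_foldB_eq, fun_firstSnd_zip]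
  cases h0 : PySem.List.index? l100 (p - 1) with
  | some k =>
    rw [h0] at hpre
    have hk : k < l200.length := by simpa using hpre
    simp [hk, PySem.List.pyGetD_natCast, List.getD_eq_getElem?_getD]
  | none =>
    rw [h0] at hpre
    simp only [Option.map_none, Option.bind_none, Option.none_or] at hpre ⊢
    cases h1 : PySem.List.index? l100 p with
    | some k =>
      rw [h1] at hpre
      have hk : k < l200.length := by simpa using hpre
      simp [hk, PySem.List.pyGetD_natCast, List.getD_eq_getElem?_getD]
    | none =>
      rw [h1] at hpre
      simp only [Option.map_none, Option.bind_none, Option.none_or] at hpre ⊢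
      cases h2 : PySem.List.index? l100 (p + 1) with
      | some k =>
        rw [h2] at hpre
        have hk : k < l200.length := by simpa using hpre
        simp [hk, PySem.List.pyGetD_natCast, List.getD_eq_getElem?_getD]
      | none => simp
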